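-- pv_equiv track=rewrite | github.com/cristieh/python_coding_interview_questions | Questions/words_to_phone_number.py | count_continuous_words_in_phone_number
-- ===== SOURCE A (Python) =====
-- def word_to_number(word):
--     numeric_representation = ''
--     for char in word:
--         char = char.lower()  # Convert to lowercase to handle uppercase letters
--         if 'a' <= char <= 'c':
--             numeric_representation += '2'
--         elif 'd' <= char <= 'f':
--             numeric_representation += '3'
--         elif 'g' <= char <= 'i':
--             numeric_representation += '4'
--         elif 'j' <= char <= 'l':
--             numeric_representation += '5'
--         elif 'm' <= char <= 'o':
--             numeric_representation += '6'
--         elif 'p' <= char <= 's':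
--             numeric_representation += '7'
--         elif 't' <= char <= 'v':
--             numeric_representation += '8'
--         elif 'w' <= char <= 'z':
--             numeric_representation += '9'
--     return numeric_representation
--
-- def count_continuous_words_in_phone_number(phone_number, word_list):
--     phone_number = str(phone_number)
--     phone_number_length = len(phone_number)
--     count = 0
--
--     for word in word_list:
--         word_numeric = word_to_number(word)
--         word_length = len(word_numeric)
--
--         for i in range(phone_number_length - word_length + 1):
--             substring = phone_number[i:i + word_length]
--
--             if word_numeric == substring:
--                 count += 1
--                 break  # Break if a match is found to avoid double counting
--
--     return count
-- ===== SOURCE B (Python) =====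
-- _TABLE = "22233344455566677778889999"
--
--
-- def _word_to_digits(word):
--     out = []
--     for c in word.lower():
--         k = ord(c) - ord('a')
--         if 0 <= k < 26:
--             out.append(_TABLE[k])
--     return ''.join(out)
--
--
-- def count_continuous_words_in_phone_number(phone_number, word_list):
--     phone_number = str(phone_number)
--     n = len(phone_number)
--     keys = [_word_to_digits(w) for w in word_list]
--     # substring index: every window of the phone number whose length some key has
--     subs = set()
--     for L in set(len(k) for k in keys):
--         for i in range(n - L + 1):
--             subs.add(phone_number[i:i + L])
--     return sum(k in subs for k in keys)
-- ===== Notes on version B (the rewrite author's own statement) =====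
-- stated objective: faster
-- what changed: Instead of scanning the phone number window-by-window for each word, B builds a substring index once (the set of all phone-number windows of the lengths the translated words have) and answers each word by a single set lookup; letters are translated via a 26-entry lookup table instead of a comparison chain.
import Mathlib
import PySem

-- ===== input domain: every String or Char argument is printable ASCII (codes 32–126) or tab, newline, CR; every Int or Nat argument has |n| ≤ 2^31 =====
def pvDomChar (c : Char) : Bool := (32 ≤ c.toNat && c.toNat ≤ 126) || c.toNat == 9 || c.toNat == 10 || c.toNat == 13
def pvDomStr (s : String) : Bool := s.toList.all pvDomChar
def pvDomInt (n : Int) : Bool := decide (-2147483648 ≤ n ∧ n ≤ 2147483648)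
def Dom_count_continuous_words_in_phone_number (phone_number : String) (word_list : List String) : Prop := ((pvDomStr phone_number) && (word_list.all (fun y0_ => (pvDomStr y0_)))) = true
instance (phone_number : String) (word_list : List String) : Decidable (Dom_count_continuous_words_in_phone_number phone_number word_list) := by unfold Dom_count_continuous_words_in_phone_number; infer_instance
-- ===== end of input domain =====

-- B replaces A's per-word window scan by a substring index: it builds ONE set of all phone-number
-- windows of the needed lengths, then answers each word by a set lookup; objective: alternative/faster.

-- ===== PORT A =====
-- helper: word_to_number — builds the keypad-digit string of a word (non-letters dropped);
-- the numeric string is represented as List Char (exact on every input)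
def pvA_wordToNumber (word : String) : List Char :=
  word.toList.foldl (fun acc ch =>
    let c := PySem.Chars.lowerChar ch
    if 'a' ≤ c ∧ c ≤ 'c' then acc ++ ['2']
    else if 'd' ≤ c ∧ c ≤ 'f' then acc ++ ['3']
    else if 'g' ≤ c ∧ c ≤ 'i' then acc ++ ['4']
    else if 'j' ≤ c ∧ c ≤ 'l' then acc ++ ['5']
    else if 'm' ≤ c ∧ c ≤ 'o' then acc ++ ['6']
    else if 'p' ≤ c ∧ c ≤ 's' then acc ++ ['7']
    else if 't' ≤ c ∧ c ≤ 'v' then acc ++ ['8']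
    else if 'w' ≤ c ∧ c ≤ 'z' then acc ++ ['9']
    else acc) []

-- helper: A's inner `for i in range(...)` with `break` — stops at the first matching window
def pvA_scan (phone : List Char) (wn : List Char) : List Int → Bool
  | [] => false
  | i :: rest =>
      if wn = PySem.List.slice phone (some i) (some (i + wn.length)) then true
      else pvA_scan phone wn rest

def count_continuous_words_in_phone_number (phone_number : String) (word_list : List String) : Int :=
  -- phone_number = str(phone_number) is the identity on a str argument
  let p := phone_number.toList
  let phone_number_length : Int := p.length
  word_list.foldl (fun count word =>
    let word_numeric := pvA_wordToNumber word
    let word_length : Int := word_numeric.length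
    if pvA_scan p word_numeric (PySem.List.pyRange 0 (phone_number_length - word_length + 1) 1) then
      count + 1
    else count) 0

-- ===== PORT B =====
def pvTable : List Char := "22233344455566677778889999".toList

-- _word_to_digits: table lookup by alphabet position; _TABLE[k] with 0 ≤ k < 26 never
-- raises, so the pyGetD default ' ' is never used
def pvB_digits (word : String) : List Char :=
  (PySem.Chars.lower word.toList).foldl (fun out c =>
    let k : Int := (c.toNat : Int) - 97
    if 0 ≤ k ∧ k < 26 then out ++ [PySem.List.pyGetD pvTable k ' '] else out) []

def count_continuous_words_in_phone_number_alt (phone_number : String) (word_list : List String) : Int :=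
  let p := phone_number.toList
  let n : Int := p.length
  let keys := word_list.map pvB_digits
  -- substring index: every window of the phone number whose length some key has; the set of
  -- lengths and the index set are only consumed by membership, so Python's hash order is immaterial
  let lens : PySem.Set Int := PySem.Set.ofList (keys.map (fun k => (k.length : Int)))
  let subs : PySem.Set (List Char) :=
    lens.foldl (fun s L =>
      (PySem.List.pyRange 0 (n - L + 1) 1).foldl (fun s i =>
        PySem.Set.add s (PySem.List.slice p (some i) (some (i + L)))) s) PySem.Set.empty
  keys.foldl (fun acc k => acc + (if PySem.Set.contains subs k then 1 else 0)) 0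

-- ===== PRECONDITION & SPEC =====
def Spec_count_continuous_words_in_phone_number (phone_number : String) (word_list : List String) (out : Int) : Prop := out = count_continuous_words_in_phone_number_alt phone_number word_list
instance (phone_number : String) (word_list : List String) (out : Int) : Decidable (Spec_count_continuous_words_in_phone_number phone_number word_list out) := by unfold Spec_count_continuous_words_in_phone_number; infer_instance

-- ===== CLAIM (what is proved, stated in full; the proofs are below) =====
def Claim_equal_count_continuous_words_in_phone_number : Prop := ∀ (phone_number : String) (word_list : List String), Dom_count_continuous_words_in_phone_number phone_number word_list → Spec_count_continuous_words_in_phone_number phone_number word_list (count_continuous_words_in_phone_number phone_number word_list)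

-- ===== LEMMAS AND PROOFS =====

-- A's per-char digit, factored out of the fold
def pvA_digit (c : Char) : List Char :=
  if 'a' ≤ c ∧ c ≤ 'c' then ['2']
  else if 'd' ≤ c ∧ c ≤ 'f' then ['3']
  else if 'g' ≤ c ∧ c ≤ 'i' then ['4']
  else if 'j' ≤ c ∧ c ≤ 'l' then ['5']
  else if 'm' ≤ c ∧ c ≤ 'o' then ['6']
  else if 'p' ≤ c ∧ c ≤ 's' then ['7']
  else if 't' ≤ c ∧ c ≤ 'v' then ['8']
  else if 'w' ≤ c ∧ c ≤ 'z' then ['9']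
  else []

theorem pvA_wordToNumber_eq_flatMap (word : String) :
    pvA_wordToNumber word = word.toList.flatMap (fun ch => pvA_digit (PySem.Chars.lowerChar ch)) := by
  have hstep : (fun (acc : List Char) (ch : Char) =>
      let c := PySem.Chars.lowerChar ch
      if 'a' ≤ c ∧ c ≤ 'c' then acc ++ ['2']
      else if 'd' ≤ c ∧ c ≤ 'f' then acc ++ ['3']
      else if 'g' ≤ c ∧ c ≤ 'i' then acc ++ ['4']
      else if 'j' ≤ c ∧ c ≤ 'l' then acc ++ ['5']
      else if 'm' ≤ c ∧ c ≤ 'o' then acc ++ ['6']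
      else if 'p' ≤ c ∧ c ≤ 's' then acc ++ ['7']
      else if 't' ≤ c ∧ c ≤ 'v' then acc ++ ['8']
      else if 'w' ≤ c ∧ c ≤ 'z' then acc ++ ['9']
      else acc)
      = (fun acc ch => acc ++ pvA_digit (PySem.Chars.lowerChar ch)) := by
    funext acc ch
    simp only [pvA_digit]
    split_ifs <;> simp
  unfold pvA_wordToNumber
  rw [hstep, PySem.List.foldl_append_eq_flatMap]
  simp

theorem pvB_digits_eq_flatMap (word : String) :
    pvB_digits word = word.toList.flatMap (fun ch =>
      let c := PySem.Chars.lowerChar ch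
      let k : Int := (c.toNat : Int) - 97
      if 0 ≤ k ∧ k < 26 then [PySem.List.pyGetD pvTable k ' '] else []) := by
  have hstep : (fun (out : List Char) (c : Char) =>
      let k : Int := (c.toNat : Int) - 97
      if 0 ≤ k ∧ k < 26 then out ++ [PySem.List.pyGetD pvTable k ' '] else out)
      = (fun out c => out ++ (let k : Int := (c.toNat : Int) - 97
          if 0 ≤ k ∧ k < 26 then [PySem.List.pyGetD pvTable k ' '] else [])) := by
    funext out c
    dsimp only
    split_ifs <;> simp
  unfold pvB_digits
  rw [PySem.Chars.lower, hstep, PySem.List.foldl_append_eq_flatMap, List.flatMap_map]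
  simp

theorem pv_le_toNat {a c : Char} (h : a ≤ c) : a.toNat ≤ c.toNat :=
  (UInt32.le_iff_toNat_le).mp (Char.le_def.mp h)

-- the two per-char translations agree on every character
theorem pv_char_eq (c : Char) :
    (if 0 ≤ (c.toNat : Int) - 97 ∧ (c.toNat : Int) - 97 < 26 then
        [PySem.List.pyGetD pvTable ((c.toNat : Int) - 97) ' '] else []) = pvA_digit c := by
  by_cases hlo : 97 ≤ c.toNat ∧ c.toNat ≤ 122
  · obtain ⟨h1, h2⟩ := hlo
    interval_cases h : c.toNat <;> (rw [← Char.ofNat_toNat c, h]; decide)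
  · have hcond : ¬ (0 ≤ (c.toNat : Int) - 97 ∧ (c.toNat : Int) - 97 < 26) := by omega
    rw [if_neg hcond]
    unfold pvA_digit
    have e1 : 'a'.toNat = 97 := by decide
    have e2 : 'c'.toNat = 99 := by decide
    have e3 : 'd'.toNat = 100 := by decide
    have e4 : 'f'.toNat = 102 := by decide
    have e5 : 'g'.toNat = 103 := by decide
    have e6 : 'i'.toNat = 105 := by decide
    have e7 : 'j'.toNat = 106 := by decide
    have e8 : 'l'.toNat = 108 := by decide
    have e9 : 'm'.toNat = 109 := by decide
    have e10 : 'o'.toNat = 111 := by decide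
    have e11 : 'p'.toNat = 112 := by decide
    have e12 : 's'.toNat = 115 := by decide
    have e13 : 't'.toNat = 116 := by decide
    have e14 : 'v'.toNat = 118 := by decide
    have e15 : 'w'.toNat = 119 := by decide
    have e16 : 'z'.toNat = 122 := by decide
    split_ifs <;>
      first
      | rfl
      | (exfalso
         apply hlo
         have hx1 := pv_le_toNat ‹_ ∧ _›.1
         have hx2 := pv_le_toNat ‹_ ∧ _›.2
         constructor <;> omega)

theorem pvB_eq_pvA (word : String) : pvB_digits word = pvA_wordToNumber word := by
  rw [pvA_wordToNumber_eq_flatMap, pvB_digits_eq_flatMap]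
  exact List.flatMap_congr (fun ch _ => pv_char_eq (PySem.Chars.lowerChar ch))

-- break-scan = List.any
theorem pvA_scan_eq_any (p wn : List Char) (l : List Int) :
    pvA_scan p wn l = l.any (fun i => wn = PySem.List.slice p (some i) (some (i + wn.length))) := by
  induction l with
  | nil => rfl
  | cons i rest ih =>
      rw [List.any_cons, ← ih]
      show (if wn = PySem.List.slice p (some i) (some (i + wn.length)) then true else pvA_scan p wn rest) = _
      split_ifs with h
      · rw [decide_eq_true h, Bool.true_or]
      · rw [decide_eq_false h, Bool.false_or]

-- the window scan finds a match iff wn is a substring (Python `in`)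
theorem pvA_scan_eq_isIn (p wn : List Char) :
    pvA_scan p wn (PySem.List.pyRange 0 ((p.length : Int) - wn.length + 1) 1) =
      PySem.Chars.isIn wn p := by
  rw [pvA_scan_eq_any]
  by_cases hfound : ∃ j, wn <+: p.drop j
  · have hIn := (PySem.Chars.exists_prefix_drop_iff_isIn wn p).1 hfound
    rw [hIn]
    obtain ⟨j, hj⟩ := hfound
    have hlen : wn.length ≤ p.length - j := by
      have := hj.length_le
      simpa using this
    by_cases hjp : j ≤ p.length
    · have hjr : (j : Int) ∈ PySem.List.pyRange 0 ((p.length : Int) - wn.length + 1) 1 := by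
        rw [PySem.List.mem_pyRange_one]
        constructor
        · exact_mod_cast Nat.zero_le j
        · have : j + wn.length ≤ p.length := by omega
          omega
      rw [List.any_eq_true]
      refine ⟨(j : Int), hjr, ?_⟩
      have : PySem.List.slice p (some (j : Int)) (some ((j : Int) + (wn.length : Int))) =
          (p.drop j).take wn.length := by
        exact_mod_cast PySem.List.slice_natCast_add p j wn.length
      simp only [this]
      exact decide_eq_true (List.prefix_iff_eq_take.1 hj)
    · have hdrop : p.drop j = [] := by
        apply List.drop_eq_nil_of_le; omega
      have hwn : wn = [] := List.prefix_nil.mp (hdrop ▸ hj)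
      subst hwn
      rw [List.any_eq_true]
      refine ⟨0, ?_, ?_⟩
      · rw [PySem.List.mem_pyRange_one]; constructor <;> omega
      · have h00 : PySem.List.slice p (some (0 : Int)) (some ((0 : Int) + (([] : List Char).length : Int))) = ([] : List Char) := by
          have := PySem.List.slice_natCast_add p 0 0
          simpa using this
        rw [h00]
        exact decide_eq_true rfl
  · have hIn : PySem.Chars.isIn wn p = false := by
      cases h : PySem.Chars.isIn wn p
      · rfl
      · exact absurd ((PySem.Chars.exists_prefix_drop_iff_isIn wn p).2 h) hfound
    rw [hIn]
    rw [List.any_eq_false]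
    intro i hi
    rw [PySem.List.mem_pyRange_one] at hi
    obtain ⟨h0, _⟩ := hi
    simp only [decide_eq_true_eq]
    intro heq
    apply hfound
    refine ⟨i.toNat, ?_⟩
    have : PySem.List.slice p (some i) (some (i + wn.length)) = (p.drop i.toNat).take wn.length := by
      have h1 : i = ((i.toNat : Nat) : Int) := by omega
      rw [h1]
      exact_mod_cast PySem.List.slice_natCast_add p i.toNat wn.length
    rw [this] at heq
    exact List.prefix_iff_eq_take.2 heq

-- membership in the substring index after the nested fold
theorem pv_mem_subs (p : List Char) (lens : List Int) (s0 : PySem.Set (List Char)) (y : List Char) :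
    y ∈ lens.foldl (fun s L =>
      (PySem.List.pyRange 0 ((p.length : Int) - L + 1) 1).foldl (fun s i =>
        PySem.Set.add s (PySem.List.slice p (some i) (some (i + L)))) s) s0 ↔
    y ∈ s0 ∨ ∃ L ∈ lens, ∃ i ∈ PySem.List.pyRange 0 ((p.length : Int) - L + 1) 1,
      y = PySem.List.slice p (some i) (some (i + L)) := by
  induction lens generalizing s0 with
  | nil => simp
  | cons L rest ih =>
      rw [List.foldl_cons, ih]
      rw [PySem.Set.mem_foldl_add]
      constructor
      · rintro (⟨h | ⟨i, hi, hy⟩⟩ | ⟨L', hL', i, hi, hy⟩)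
        · exact Or.inl h
        · exact Or.inr ⟨L, List.mem_cons_self, i, hi, hy⟩
        · exact Or.inr ⟨L', List.mem_cons_of_mem _ hL', i, hi, hy⟩
      · rintro (h | ⟨L', hL', i, hi, hy⟩)
        · exact Or.inl (Or.inl h)
        · rcases List.mem_cons.mp hL' with rfl | hL'
          · exact Or.inl (Or.inr ⟨i, hi, hy⟩)
          · exact Or.inr ⟨L', hL', i, hi, hy⟩

-- a key of length L (present among the indexed lengths) is in the index iff it is a substring
theorem pv_contains_subs_iff (p : List Char) (lens : List Int) (k : List Char)
    (hk : (k.length : Int) ∈ lens) (hpos : ∀ L ∈ lens, 0 ≤ L) :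
    (PySem.Set.contains (lens.foldl (fun s L =>
      (PySem.List.pyRange 0 ((p.length : Int) - L + 1) 1).foldl (fun s i =>
        PySem.Set.add s (PySem.List.slice p (some i) (some (i + L)))) s) PySem.Set.empty) k)
      = PySem.Chars.isIn k p := by
  by_cases hin : PySem.Chars.isIn k p = true
  · rw [hin]
    rw [PySem.Set.contains_iff, pv_mem_subs]
    obtain ⟨j, hj⟩ := (PySem.Chars.exists_prefix_drop_iff_isIn k p).2 hin
    by_cases hjp : j ≤ p.length
    · have hlen : k.length ≤ p.length - j := by
        have := hj.length_le
        simpa using this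
      refine Or.inr ⟨(k.length : Int), hk, (j : Int), ?_, ?_⟩
      · rw [PySem.List.mem_pyRange_one]
        constructor
        · exact_mod_cast Nat.zero_le j
        · omega
      · have hs : PySem.List.slice p (some (j : Int)) (some ((j : Int) + (k.length : Int))) =
            (p.drop j).take k.length := by
          exact_mod_cast PySem.List.slice_natCast_add p j k.length
        rw [hs]
        exact List.prefix_iff_eq_take.1 hj
    · have hdrop : p.drop j = [] := by apply List.drop_eq_nil_of_le; omega
      have hk0 : k = [] := List.prefix_nil.mp (hdrop ▸ hj)
      subst hk0
      refine Or.inr ⟨0, by simpa using hk, 0, ?_, ?_⟩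
      · rw [PySem.List.mem_pyRange_one]; constructor <;> omega
      · have := PySem.List.slice_natCast_add p 0 0
        simpa using this.symm
  · have hin' : PySem.Chars.isIn k p = false := by
      cases h : PySem.Chars.isIn k p
      · rfl
      · exact absurd h hin
    rw [hin']
    rw [Bool.eq_false_iff]
    intro hc
    rw [PySem.Set.contains_iff, pv_mem_subs] at hc
    rcases hc with h | ⟨L, hL, i, hi, hy⟩
    · simp [PySem.Set.empty] at h
    · rw [PySem.List.mem_pyRange_one] at hi
      obtain ⟨h0, _⟩ := hi
      have hLpos := hpos L hL
      apply hin
      apply (PySem.Chars.exists_prefix_drop_iff_isIn k p).1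
      refine ⟨i.toNat, ?_⟩
      have hs : PySem.List.slice p (some i) (some (i + L)) = (p.drop i.toNat).take L.toNat := by
        have h1 : i = ((i.toNat : Nat) : Int) := by omega
        have h2 : L = ((L.toNat : Nat) : Int) := by omega
        rw [h1, h2]
        exact_mod_cast PySem.List.slice_natCast_add p i.toNat L.toNat
      rw [hy, hs]
      exact List.take_prefix _ _

-- ===== VERDICT (by name: the statement is the Claim_ definition above) =====
theorem count_continuous_words_in_phone_number_spec : Claim_equal_count_continuous_words_in_phone_number := by
  intro phone_number word_list _
  unfold Spec_count_continuous_words_in_phone_number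
  unfold count_continuous_words_in_phone_number count_continuous_words_in_phone_number_alt
  simp only []
  set p := phone_number.toList with hp
  have hcond : ∀ word ∈ word_list,
      pvA_scan p (pvA_wordToNumber word)
        (PySem.List.pyRange 0 ((p.length : Int) - (pvA_wordToNumber word).length + 1) 1) =
      PySem.Set.contains
        ((PySem.Set.ofList ((word_list.map pvB_digits).map (fun k => (k.length : Int)))).foldl
          (fun s L => (PySem.List.pyRange 0 ((p.length : Int) - L + 1) 1).foldl (fun s i =>
            PySem.Set.add s (PySem.List.slice p (some i) (some (i + L)))) s) PySem.Set.empty)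
        (pvB_digits word) := by
    intro word hw
    have hk : ((pvB_digits word).length : Int) ∈
        PySem.Set.ofList ((word_list.map pvB_digits).map (fun k => (k.length : Int))) := by
      rw [PySem.Set.mem_ofList]
      exact List.mem_map.mpr ⟨pvB_digits word, List.mem_map.mpr ⟨word, hw, rfl⟩, rfl⟩
    have hpos : ∀ L ∈ PySem.Set.ofList ((word_list.map pvB_digits).map (fun k => (k.length : Int))), 0 ≤ L := by
      intro L hL
      rw [PySem.Set.mem_ofList] at hL
      obtain ⟨k, _, rfl⟩ := List.mem_map.mp hL
      exact Int.natCast_nonneg _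
    rw [← pvB_eq_pvA word, pvA_scan_eq_isIn]
    exact (pv_contains_subs_iff p _ _ hk hpos).symm
  rw [List.foldl_map]
  apply PySem.List.foldl_congr_mem
  intro acc word hw
  rw [hcond word hw]
  split_ifs <;> omega
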